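-- pv_equiv track=rewrite | github.com/Trevor-Ferris/Advent-of-Code-2024 | Aoc6/Aoc6p1.py | move_arrow
-- ===== SOURCE A (Python) =====
-- def change_dir(dir):
--     '''Turns the direction of the arrow given to the right'''
--     dirs = ['<', 'v', '>', '^']
--     new_dir = dirs[dirs.index(dir) - 1]
--     return new_dir
--
-- def move_arrow(maze, pos_x, pos_y, dir):
--     '''Calculates the next position '''
--     maze[pos_x][pos_y] = 'X'
--     match dir:
--         case '<':
--             #check ahead if '#' change the direction if so
--             if maze[pos_x][pos_y - 1] == '#':
--                 dir = change_dir(dir)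
--                 return move_arrow(maze, pos_x, pos_y, dir)
--             else:
--                 return (maze, pos_x, pos_y - 1, dir)
--         case 'v':
--             if maze[pos_x + 1][pos_y] == '#':
--                 dir = change_dir(dir)
--                 return move_arrow(maze, pos_x, pos_y, dir)
--             else:
--                 return (maze, pos_x + 1, pos_y, dir)
--         case '>':
--             if maze[pos_x][pos_y + 1] == '#':
--                 dir = change_dir(dir)
--                 return move_arrow(maze, pos_x, pos_y, dir)
--             else:
--                 return (maze, pos_x, pos_y + 1, dir)
--         case '^':
--             if maze[pos_x - 1][pos_y] == '#':
--                 dir = change_dir(dir)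
--                 return move_arrow(maze, pos_x, pos_y, dir)
--             else:
--                 return (maze, pos_x - 1, pos_y, dir)
-- ===== SOURCE B (Python) =====
-- # Table-driven iterative re-implementation: offset/turn dicts + a bounded loop
-- # instead of the 4-way match with recursion. Mutates maze in place like A.
-- OFFSETS = {'<': (0, -1), 'v': (1, 0), '>': (0, 1), '^': (-1, 0)}
-- TURN = {'<': '^', 'v': '<', '>': 'v', '^': '>'}
--
-- def move_arrow(maze, pos_x, pos_y, dir):
--     maze[pos_x][pos_y] = 'X'
--     for _ in range(4):
--         dx, dy = OFFSETS[dir]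
--         if maze[pos_x + dx][pos_y + dy] == '#':
--             dir = TURN[dir]
--         else:
--             return (maze, pos_x + dx, pos_y + dy, dir)
--     return (maze, pos_x, pos_y, dir)
-- ===== Notes on version B (the rewrite author's own statement) =====
-- stated objective: alternative
-- what changed: Replaces A's 4-way match with per-direction recursion (and a list-index-arithmetic change_dir helper) by direction->offset and right-turn lookup tables driving one bounded iterative loop.
-- outside the precondition, e.g. on move_arrow([['.']], 0, 0, '?'): A returns None, B raises KeyError
-- crash fix: On a cell whose four neighbouring cells (Python wraparound indexing) are all '#', A recurses through the directions forever and raises RecursionError, while B's bounded loop returns the unchanged position (maze, pos_x, pos_y, dir). — e.g. on move_arrow([["#", "#", "#"], ["#", ".", "#"], ["#", "#", "#"]], 1, 1, "^"): A raises RecursionError, B returns ([["#", "#", "#"], ["#", "X", "#"], ["#", "#", "#"]], 1, 1, "^")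
import Mathlib
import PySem

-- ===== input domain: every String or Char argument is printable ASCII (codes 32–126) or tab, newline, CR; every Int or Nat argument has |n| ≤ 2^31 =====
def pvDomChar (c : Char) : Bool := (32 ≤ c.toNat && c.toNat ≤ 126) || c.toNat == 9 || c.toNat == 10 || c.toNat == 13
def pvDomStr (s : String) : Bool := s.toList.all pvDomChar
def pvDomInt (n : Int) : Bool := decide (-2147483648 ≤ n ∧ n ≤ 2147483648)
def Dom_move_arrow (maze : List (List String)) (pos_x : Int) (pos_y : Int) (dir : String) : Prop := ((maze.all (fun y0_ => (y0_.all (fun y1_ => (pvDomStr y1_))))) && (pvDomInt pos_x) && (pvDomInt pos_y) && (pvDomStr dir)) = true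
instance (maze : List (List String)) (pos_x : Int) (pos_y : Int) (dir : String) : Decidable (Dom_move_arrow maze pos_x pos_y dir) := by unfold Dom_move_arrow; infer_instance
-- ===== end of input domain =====

-- B replaces A's 4-way match + recursion by a direction table and a bounded loop (same return value;
-- both Pythons mutate maze[pos_x][pos_y] in place identically; the theorems are about the return value).

-- shared indexing/mutation primitives (Python semantics, negative indices wrap)
-- maze[i][j]  (none = IndexError)
def pvCell? (m : List (List String)) (i j : Int) : Option String :=
  match PySem.List.pyGet? m i with
  | some row => PySem.List.pyGet? row j
  | none => none

-- maze[i][j] = 'X'  (identity where Python would raise IndexError; Pre_ excludes that)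
def pvMark (m : List (List String)) (i j : Int) : List (List String) :=
  match PySem.List.pyGet? m i with
  | some row => PySem.List.pySetD m i (PySem.List.pySetD row j "X")
  | none => m

-- ===== PORT A =====
-- change_dir: dirs.index(dir) - 1, Python's negative index wraps (exact via pyGet?)
def change_dir (dir : String) : String :=
  let dirs : List String := ["<", "v", ">", "^"]
  match PySem.List.index? dirs dir with
  | some i => ((PySem.List.pyGet? dirs ((i : Int) - 1)).getD dir)
  | none => dir   -- ValueError in Python; unreachable from move_arrow's calls (dir ∈ dirs there)

-- A's recursion changes only dir, which cycles with period 4 ('<'→'^'→'>'→'v'→'<'), the maze cell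
-- already being 'X'; so A either returns within 4 calls or recurses forever (RecursionError).
-- Fuel 4 is therefore exact on every input where A terminates; non-termination is outside Pre_.
def moveA : Nat → List (List String) → Int → Int → String → List (List String) × Int × Int × String
  | 0, maze, pos_x, pos_y, dir => (maze, pos_x, pos_y, dir)   -- unreachable under Pre_
  | n + 1, maze, pos_x, pos_y, dir =>
    let m := pvMark maze pos_x pos_y
    if dir = "<" then
      if pvCell? m pos_x (pos_y - 1) = some "#" then moveA n m pos_x pos_y (change_dir "<")
      else (m, pos_x, pos_y - 1, dir)
    else if dir = "v" then
      if pvCell? m (pos_x + 1) pos_y = some "#" then moveA n m pos_x pos_y (change_dir "v")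
      else (m, pos_x + 1, pos_y, dir)
    else if dir = ">" then
      if pvCell? m pos_x (pos_y + 1) = some "#" then moveA n m pos_x pos_y (change_dir ">")
      else (m, pos_x, pos_y + 1, dir)
    else if dir = "^" then
      if pvCell? m (pos_x - 1) pos_y = some "#" then moveA n m pos_x pos_y (change_dir "^")
      else (m, pos_x - 1, pos_y, dir)
    else (m, pos_x, pos_y, dir)   -- no match case: Python returns None, outside Pre_

def move_arrow (maze : List (List String)) (pos_x : Int) (pos_y : Int) (dir : String) : List (List String) × Int × Int × String :=
  moveA 4 maze pos_x pos_y dir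

-- ===== PORT B =====
def pvOFFSETS : PySem.Dict String (Int × Int) :=
  PySem.Dict.ofList [("<", (0, -1)), ("v", (1, 0)), (">", (0, 1)), ("^", (-1, 0))]
def pvTURN : PySem.Dict String String :=
  PySem.Dict.ofList [("<", "^"), ("v", "<"), (">", "v"), ("^", ">")]

-- the 'for _ in range(4)' loop (counter counts remaining iterations)
def moveB : Nat → List (List String) → Int → Int → String → List (List String) × Int × Int × String
  | 0, m, pos_x, pos_y, dir => (m, pos_x, pos_y, dir)   -- fell off the loop: boxed in, stay put
  | n + 1, m, pos_x, pos_y, dir =>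
    match PySem.Dict.get? pvOFFSETS dir with
    | none => (m, pos_x, pos_y, dir)   -- KeyError in Python, outside Pre_
    | some (dx, dy) =>
      if pvCell? m (pos_x + dx) (pos_y + dy) = some "#" then
        moveB n m pos_x pos_y ((PySem.Dict.get? pvTURN dir).getD dir)
      else (m, pos_x + dx, pos_y + dy, dir)

def move_arrow_alt (maze : List (List String)) (pos_x : Int) (pos_y : Int) (dir : String) : List (List String) × Int × Int × String :=
  moveB 4 (pvMark maze pos_x pos_y) pos_x pos_y dir

-- ===== PRECONDITION & SPEC =====
-- helpers for Pre_: the (dx,dy) of a direction, the right-turn successor, and the two probe outcomes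
def pvStep : String → Int × Int
  | "<" => (0, -1) | "v" => (1, 0) | ">" => (0, 1) | "^" => (-1, 0) | _ => (0, 0)
def pvTurnF : String → String
  | "<" => "^" | "v" => "<" | ">" => "v" | _ => ">"
-- cell ahead exists and is not '#'
def pvOkB (m : List (List String)) (pos_x pos_y : Int) (d : String) : Bool :=
  match pvCell? m (pos_x + (pvStep d).1) (pos_y + (pvStep d).2) with
  | some c => c ≠ "#"
  | none => false
-- cell ahead is '#'
def pvBlkB (m : List (List String)) (pos_x pos_y : Int) (d : String) : Bool :=
  pvCell? m (pos_x + (pvStep d).1) (pos_y + (pvStep d).2) = some "#"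

-- Pre_ excludes exactly the inputs where the Python A does not return a tuple: the marked cell out of
-- range (IndexError), dir not one of '<' 'v' '>' '^' (A falls through the match and returns None),
-- a probed cell out of range before a free cell is found (IndexError), and all four neighbours '#'
-- (infinite recursion, RecursionError).
def Pre_move_arrow (maze : List (List String)) (pos_x : Int) (pos_y : Int) (dir : String) : Prop :=
  PySem.Raise.InRange maze.length pos_x ∧
  PySem.Raise.InRange (PySem.List.pyGetD maze pos_x []).length pos_y ∧
  dir ∈ (["<", "v", ">", "^"] : List String) ∧
  (let m := pvMark maze pos_x pos_y
   let d1 := pvTurnF dir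
   let d2 := pvTurnF d1
   let d3 := pvTurnF d2
   pvOkB m pos_x pos_y dir = true ∨
   (pvBlkB m pos_x pos_y dir = true ∧ pvOkB m pos_x pos_y d1 = true) ∨
   (pvBlkB m pos_x pos_y dir = true ∧ pvBlkB m pos_x pos_y d1 = true ∧ pvOkB m pos_x pos_y d2 = true) ∨
   (pvBlkB m pos_x pos_y dir = true ∧ pvBlkB m pos_x pos_y d1 = true ∧ pvBlkB m pos_x pos_y d2 = true ∧ pvOkB m pos_x pos_y d3 = true))
instance (maze : List (List String)) (pos_x : Int) (pos_y : Int) (dir : String) : Decidable (Pre_move_arrow maze pos_x pos_y dir) := by unfold Pre_move_arrow; infer_instance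

def pvWitness_move_arrow : List (List String) × Int × Int × String :=
  ([[".", "."], [".", "."]], 0, 0, ">")

-- On a cell whose four neighbours (Python wraparound indexing) are all '#', A recurses through the four
-- directions forever and raises RecursionError, while B's bounded loop returns the guard's unchanged position.
def Raises_move_arrow (maze : List (List String)) (pos_x : Int) (pos_y : Int) (dir : String) : Prop :=
  PySem.Raise.InRange maze.length pos_x ∧
  PySem.Raise.InRange (PySem.List.pyGetD maze pos_x []).length pos_y ∧
  dir ∈ (["<", "v", ">", "^"] : List String) ∧
  (let m := pvMark maze pos_x pos_y
   pvBlkB m pos_x pos_y "<" = true ∧ pvBlkB m pos_x pos_y "v" = true ∧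
   pvBlkB m pos_x pos_y ">" = true ∧ pvBlkB m pos_x pos_y "^" = true)
instance (maze : List (List String)) (pos_x : Int) (pos_y : Int) (dir : String) : Decidable (Raises_move_arrow maze pos_x pos_y dir) := by unfold Raises_move_arrow; infer_instance

def pvRaiseWitness_move_arrow : List (List String) × Int × Int × String :=
  ([["#", "#", "#"], ["#", ".", "#"], ["#", "#", "#"]], 1, 1, "^")
def pvRaiseWitnessOut_move_arrow : List (List String) × Int × Int × String :=
  ([["#", "#", "#"], ["#", "X", "#"], ["#", "#", "#"]], 1, 1, "^")

def Spec_move_arrow (maze : List (List String)) (pos_x : Int) (pos_y : Int) (dir : String) (out : List (List String) × Int × Int × String) : Prop := out = move_arrow_alt maze pos_x pos_y dir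
instance (maze : List (List String)) (pos_x : Int) (pos_y : Int) (dir : String) (out : List (List String) × Int × Int × String) : Decidable (Spec_move_arrow maze pos_x pos_y dir out) := by unfold Spec_move_arrow; infer_instance

-- ===== CLAIM (what is proved, stated in full; the proofs are below) =====
def Claim_equal_move_arrow : Prop := ∀ (maze : List (List String)) (pos_x : Int) (pos_y : Int) (dir : String), Dom_move_arrow maze pos_x pos_y dir → Pre_move_arrow maze pos_x pos_y dir → Spec_move_arrow maze pos_x pos_y dir (move_arrow maze pos_x pos_y dir)
def Claim_raises_move_arrow : Prop := (∀ (maze : List (List String)) (pos_x : Int) (pos_y : Int) (dir : String), Dom_move_arrow maze pos_x pos_y dir → Raises_move_arrow maze pos_x pos_y dir → ¬ Pre_move_arrow maze pos_x pos_y dir) ∧ (Dom_move_arrow (pvRaiseWitness_move_arrow.1) (pvRaiseWitness_move_arrow.2.1) (pvRaiseWitness_move_arrow.2.2.1) (pvRaiseWitness_move_arrow.2.2.2) ∧ Raises_move_arrow (pvRaiseWitness_move_arrow.1) (pvRaiseWitness_move_arrow.2.1) (pvRaiseWitness_move_arrow.2.2.1) (pvRaiseWitness_move_arrow.2.2.2)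 ∧ move_arrow_alt (pvRaiseWitness_move_arrow.1) (pvRaiseWitness_move_arrow.2.1) (pvRaiseWitness_move_arrow.2.2.1) (pvRaiseWitness_move_arrow.2.2.2) = pvRaiseWitnessOut_move_arrow)

-- ===== LEMMAS AND PROOFS =====
lemma pyIdx?_lt {n : Nat} {i : Int} {k : Nat} (h : PySem.List.pyIdx? n i = some k) : k < n := by
  unfold PySem.List.pyIdx? at h
  split_ifs at h with h1 h2 h3 <;> simp_all <;> omega

lemma pySetD_idem {α : Type} (xs : List α) (i : Int) (v : α) :
    PySem.List.pySetD (PySem.List.pySetD xs i v) i v = PySem.List.pySetD xs i v := by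
  simp only [PySem.List.pySetD, PySem.List.pySet?]
  cases h : PySem.List.pyIdx? xs.length i with
  | none => simp [h]
  | some k => simp [h, List.length_set, List.set_set]

lemma pvMark_idem (m : List (List String)) (i j : Int) :
    pvMark (pvMark m i j) i j = pvMark m i j := by
  unfold pvMark
  cases h : PySem.List.pyGet? m i with
  | none => simp [h]
  | some row =>
    simp only []
    have hk : ∃ k, PySem.List.pyIdx? m.length i = some k := by
      unfold PySem.List.pyGet? at h
      cases hk : PySem.List.pyIdx? m.length i with
      | none => rw [hk] at h; simp at h
      | some k => exact ⟨k, rfl⟩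
    obtain ⟨k, hk⟩ := hk
    have hklt : k < m.length := pyIdx?_lt hk
    have hrow : m[k]? = some row := by
      unfold PySem.List.pyGet? at h; rw [hk] at h; simpa using h
    have hset : PySem.List.pySetD m i (PySem.List.pySetD row j "X")
        = m.set k (PySem.List.pySetD row j "X") := by
      simp [PySem.List.pySetD, PySem.List.pySet?, hk]
    rw [hset]
    have hlen : (m.set k (PySem.List.pySetD row j "X")).length = m.length := by simp
    have hget2 : PySem.List.pyGet? (m.set k (PySem.List.pySetD row j "X")) i
        = some (PySem.List.pySetD row j "X") := by
      unfold PySem.List.pyGet?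
      rw [hlen, hk]
      simp [hklt]
    rw [hget2]
    have hr := pySetD_idem row j "X"
    generalize hgen : PySem.List.pySetD row j "X" = r at hr ⊢
    show PySem.List.pySetD (m.set k r) i (PySem.List.pySetD r j "X") = m.set k r
    rw [hr]
    simp only [PySem.List.pySetD, PySem.List.pySet?, List.length_set, hk, Option.map_some,
      Option.getD_some, List.set_set]

-- "A finds a free cell within n probes, turning right between probes"
def pvOkWithin : Nat → List (List String) → Int → Int → String → Prop
  | 0, _, _, _, _ => False
  | n + 1, m, pos_x, pos_y, d =>
      pvCell? m (pos_x + (pvStep d).1) (pos_y + (pvStep d).2) ≠ some "#" ∨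
      pvOkWithin n m pos_x pos_y (pvTurnF d)

lemma moveA_mark (n : Nat) (maze : List (List String)) (px py : Int) (d : String) :
    moveA (n + 1) maze px py d = moveA (n + 1) (pvMark maze px py) px py d := by
  simp only [moveA, pvMark_idem]

lemma getOff_lt : PySem.Dict.get? pvOFFSETS "<" = some ((0 : Int), (-1 : Int)) := by decide
lemma getOff_dn : PySem.Dict.get? pvOFFSETS "v" = some ((1 : Int), (0 : Int)) := by decide
lemma getOff_rt : PySem.Dict.get? pvOFFSETS ">" = some ((0 : Int), (1 : Int)) := by decide
lemma getOff_up : PySem.Dict.get? pvOFFSETS "^" = some ((-1 : Int), (0 : Int)) := by decide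
lemma getTurn_lt : PySem.Dict.get? pvTURN "<" = some "^" := by decide
lemma getTurn_dn : PySem.Dict.get? pvTURN "v" = some "<" := by decide
lemma getTurn_rt : PySem.Dict.get? pvTURN ">" = some "v" := by decide
lemma getTurn_up : PySem.Dict.get? pvTURN "^" = some ">" := by decide
lemma cd_lt : change_dir "<" = "^" := by decide
lemma cd_dn : change_dir "v" = "<" := by decide
lemma cd_rt : change_dir ">" = "v" := by decide
lemma cd_up : change_dir "^" = ">" := by decide

lemma key (n : Nat) (m : List (List String)) (px py : Int) (d : String)
    (hd : d ∈ (["<", "v", ">", "^"] : List String)) (hm : pvMark m px py = m)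
    (hok : pvOkWithin n m px py d) :
    moveA n m px py d = moveB n m px py d := by
  induction n generalizing d with
  | zero => exact absurd hok (by simp [pvOkWithin])
  | succ n ih =>
    fin_cases hd
    · simp only [pvOkWithin, pvStep] at hok
      simp only [add_zero] at hok
      simp only [moveA, moveB, hm, getOff_lt, getTurn_lt, cd_lt, String.reduceEq, reduceIte,
        Option.getD_some, add_zero, sub_eq_add_neg]
      split_ifs with hblk
      · refine ih "^" (by decide) ?_
        rcases hok with hok | hok
        · exact absurd hblk hok
        · simpa [pvTurnF] using hok
      · rfl
    · simp only [pvOkWithin, pvStep] at hok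
      simp only [add_zero] at hok
      simp only [moveA, moveB, hm, getOff_dn, getTurn_dn, cd_dn, String.reduceEq, reduceIte,
        Option.getD_some, add_zero, sub_eq_add_neg]
      split_ifs with hblk
      · refine ih "<" (by decide) ?_
        rcases hok with hok | hok
        · exact absurd hblk hok
        · simpa [pvTurnF] using hok
      · rfl
    · simp only [pvOkWithin, pvStep] at hok
      simp only [add_zero] at hok
      simp only [moveA, moveB, hm, getOff_rt, getTurn_rt, cd_rt, String.reduceEq, reduceIte,
        Option.getD_some, add_zero, sub_eq_add_neg]
      split_ifs with hblk
      · refine ih "v" (by decide) ?_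
        rcases hok with hok | hok
        · exact absurd hblk hok
        · simpa [pvTurnF] using hok
      · rfl
    · simp only [pvOkWithin, pvStep] at hok
      simp only [add_zero] at hok
      simp only [moveA, moveB, hm, getOff_up, getTurn_up, cd_up, String.reduceEq, reduceIte,
        Option.getD_some, add_zero, sub_eq_add_neg]
      split_ifs with hblk
      · refine ih ">" (by decide) ?_
        rcases hok with hok | hok
        · exact absurd hblk hok
        · simpa [pvTurnF] using hok
      · rfl

theorem pre_to_okwithin (maze : List (List String)) (px py : Int) (d : String)
    (h : Pre_move_arrow maze px py d) :
    pvOkWithin 4 (pvMark maze px py) px py d := by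
  obtain ⟨-, -, -, h4⟩ := h
  simp only at h4
  have ok_ne : ∀ m x y e, pvOkB m x y e = true →
      pvCell? m (x + (pvStep e).1) (y + (pvStep e).2) ≠ some "#" := by
    intro m x y e he
    unfold pvOkB at he
    cases hc : pvCell? m (x + (pvStep e).1) (y + (pvStep e).2) with
    | none => simp
    | some c => rw [hc] at he; simp at he; simp [he]
  simp only [pvOkWithin]
  rcases h4 with h | ⟨_, h⟩ | ⟨_, _, h⟩ | ⟨_, _, _, h⟩
  · exact Or.inl (ok_ne _ _ _ _ h)
  · exact Or.inr (Or.inl (ok_ne _ _ _ _ h))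
  · exact Or.inr (Or.inr (Or.inl (ok_ne _ _ _ _ h)))
  · exact Or.inr (Or.inr (Or.inr (Or.inl (ok_ne _ _ _ _ h))))

-- ===== VERDICT (by name: the statement is the Claim_ definition above) =====
theorem move_arrow_spec : Claim_equal_move_arrow := by
  intro maze px py d _ hpre
  unfold Spec_move_arrow move_arrow move_arrow_alt
  rw [moveA_mark]
  exact key 4 (pvMark maze px py) px py d hpre.2.2.1 (pvMark_idem maze px py)
    (pre_to_okwithin maze px py d hpre)

@[simp]
theorem move_arrow_raises : Claim_raises_move_arrow := by
  unfold Claim_raises_move_arrow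
  refine ⟨?_, by decide⟩
  intro maze px py d _ hr hp
  obtain ⟨-, -, -, hall⟩ := hr
  obtain ⟨-, -, hd, h4⟩ := hp
  simp only at hall h4
  obtain ⟨b1, b2, b3, b4⟩ := hall
  have blk_not_ok : ∀ m x y e, pvBlkB m x y e = true → ¬ pvOkB m x y e = true := by
    intro m x y e hb ho
    unfold pvBlkB at hb
    unfold pvOkB at ho
    simp at hb
    rw [hb] at ho
    simp at ho
  have ball : ∀ e, e ∈ (["<", "v", ">", "^"] : List String) →
      pvBlkB (pvMark maze px py) px py e = true := by
    intro e he; fin_cases he <;> assumption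
  have hturn : ∀ e, e ∈ (["<", "v", ">", "^"] : List String) →
      pvTurnF e ∈ (["<", "v", ">", "^"] : List String) := by decide
  rcases h4 with h | ⟨-, h⟩ | ⟨-, -, h⟩ | ⟨-, -, -, h⟩
  · exact blk_not_ok _ _ _ _ (ball _ hd) h
  · exact blk_not_ok _ _ _ _ (ball _ (hturn _ hd)) h
  · exact blk_not_ok _ _ _ _ (ball _ (hturn _ (hturn _ hd))) h
  · exact blk_not_ok _ _ _ _ (ball _ (hturn _ (hturn _ (hturn _ hd)))) h
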